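-- pv_equiv track=rewrite | github.com/cbil-vt/iDDN | src/iddn_extra/data_gpaa.py | sort_nodes
-- ===== SOURCE A (Python) =====
-- def sort_nodes(nodes_show):
--     node0 = list()
--     node1 = list()
--     node2 = list()
--     for n in nodes_show:
--         if n[-2:] == "_1":
--             node1.append(n)
--         elif n[-2:] == "_2":
--             node2.append(n)
--         else:
--             node0.append(n)
--     node0.sort()
--     node0 = node0[-2:] + node0[:-2]
--     node1.sort()
--     node2.sort()
--     nodes_show = node0 + node1 + node2
--     return nodes_show
-- ===== SOURCE B (Python) =====
-- def _insort(lst, n):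
--     # binary search for the rightmost insertion point of n (bisect_right), then insert there
--     lo, hi = 0, len(lst)
--     while lo < hi:
--         mid = (lo + hi) // 2
--         if n < lst[mid]:
--             hi = mid
--         else:
--             lo = mid + 1
--     lst.insert(lo, n)
--
--
-- def sort_nodes(nodes_show):
--     # one pass: route each name to its bucket, keeping every bucket sorted as we go
--     node0 = []
--     node1 = []
--     node2 = []
--     for n in nodes_show:
--         if n[-2:] == "_1":
--             _insort(node1, n)
--         elif n[-2:] == "_2":
--             _insort(node2, n)
--         else:
--             _insort(node0, n)
--     node0 = node0[-2:] + node0[:-2]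
--     return node0 + node1 + node2
-- ===== Notes on version B (the rewrite author's own statement) =====
-- stated objective: alternative
-- what changed: B never calls sort: it makes one pass over the input, inserting each name at its sorted position in its bucket via a hand-written binary search (online binary-insertion sort), instead of A's partition-then-builtin-sort-each-bucket; the rotation of the no-suffix bucket is unchanged.
import Mathlib
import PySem

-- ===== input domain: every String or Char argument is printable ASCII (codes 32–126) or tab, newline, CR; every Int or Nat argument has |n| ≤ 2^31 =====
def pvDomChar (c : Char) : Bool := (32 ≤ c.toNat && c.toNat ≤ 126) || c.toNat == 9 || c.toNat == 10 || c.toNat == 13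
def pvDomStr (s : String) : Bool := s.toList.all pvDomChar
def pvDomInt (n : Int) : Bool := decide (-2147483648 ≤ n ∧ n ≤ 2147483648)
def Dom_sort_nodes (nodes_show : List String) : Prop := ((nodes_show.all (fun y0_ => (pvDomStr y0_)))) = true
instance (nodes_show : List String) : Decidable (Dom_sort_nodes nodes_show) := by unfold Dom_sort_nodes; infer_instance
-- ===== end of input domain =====

-- B makes one pass, inserting each name at its sorted position in its bucket by binary search
-- (no sort call), instead of A's partition-then-sort-each-bucket; same value, alternative algorithm.

-- n[-2:] == "_1" / "_2", on code points (shared suffix test; used by both ports)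
def pvIsS1 (n : String) : Bool := PySem.List.slice n.toList (some (-2)) none == "_1".toList
def pvIsS2 (n : String) : Bool := PySem.List.slice n.toList (some (-2)) none == "_2".toList

-- ===== PORT A =====
def pvStepA (acc : List String × List String × List String) (n : String) :
    List String × List String × List String :=
  if pvIsS1 n then (acc.1, acc.2.1 ++ [n], acc.2.2)
  else if pvIsS2 n then (acc.1, acc.2.1, acc.2.2 ++ [n])
  else (acc.1 ++ [n], acc.2.1, acc.2.2)

def sort_nodes (nodes_show : List String) : List String :=
  let t := nodes_show.foldl pvStepA ([], [], [])
  let node0 := PySem.List.sorted t.1 (fun x => x) false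
  let node0 := PySem.List.slice node0 (some (-2)) none ++ PySem.List.slice node0 none (some (-2))
  let node1 := PySem.List.sorted t.2.1 (fun x => x) false
  let node2 := PySem.List.sorted t.2.2 (fun x => x) false
  node0 ++ node1 ++ node2

-- ===== PORT B =====
-- _insort: the while loop is exactly bisect_right, ported with the prelude's primitive
-- PySem.List.bisectRight; lst[:lo] / lst[lo:] with 0 ≤ lo are List.take / List.drop (exact).
def pvInsortB (lst : List String) (n : String) : List String :=
  let lo := PySem.List.bisectRight lst n
  lst.take lo ++ n :: lst.drop lo

def pvStepB (acc : List String × List String × List String) (n : String) :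
    List String × List String × List String :=
  if pvIsS1 n then (acc.1, pvInsortB acc.2.1 n, acc.2.2)
  else if pvIsS2 n then (acc.1, acc.2.1, pvInsortB acc.2.2 n)
  else (pvInsortB acc.1 n, acc.2.1, acc.2.2)

def sort_nodes_alt (nodes_show : List String) : List String :=
  let t := nodes_show.foldl pvStepB ([], [], [])
  let node0 := PySem.List.slice t.1 (some (-2)) none ++ PySem.List.slice t.1 none (some (-2))
  node0 ++ t.2.1 ++ t.2.2

-- ===== PRECONDITION & SPEC =====
def Spec_sort_nodes (nodes_show : List String) (out : List String) : Prop := out = sort_nodes_alt nodes_show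
instance (nodes_show : List String) (out : List String) : Decidable (Spec_sort_nodes nodes_show out) := by unfold Spec_sort_nodes; infer_instance

-- ===== CLAIM =====
def Claim_equal_sort_nodes : Prop := ∀ (nodes_show : List String), Dom_sort_nodes nodes_show → Spec_sort_nodes nodes_show (sort_nodes nodes_show)

-- ===== LEMMAS AND PROOFS =====

-- proof-only model of one ordered insert: n goes before the first element it is < (after equals)
def pvInsort (lst : List String) (n : String) : List String :=
  match lst with
  | [] => [n]
  | x :: t => if n < x then n :: x :: t else x :: pvInsort t n

-- the bisect_right loop, on a sorted segment: result r ∈ [lo,hi], everything before r is ≤ x,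
-- everything in [r,hi) is > x
lemma bisectRightLoop_spec (xs : List String) (x : String) (fuel lo hi : Nat)
    (hs : xs.Pairwise (· ≤ ·)) (hlo : lo ≤ hi) (hhi : hi ≤ xs.length) (hfuel : hi - lo ≤ fuel) :
    lo ≤ PySem.List.bisectRightLoop xs x fuel lo hi ∧
    PySem.List.bisectRightLoop xs x fuel lo hi ≤ hi ∧
    (∀ j (hj : j < xs.length), lo ≤ j → j < PySem.List.bisectRightLoop xs x fuel lo hi → xs[j] ≤ x) ∧
    (∀ j (hj : j < xs.length), PySem.List.bisectRightLoop xs x fuel lo hi ≤ j → j < hi → x < xs[j]) := by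
  have hmono : ∀ (p q : Nat) (hpq : p ≤ q) (hq : q < xs.length),
      xs[p]'(Nat.lt_of_le_of_lt hpq hq) ≤ xs[q] := by
    intro p q hpq hq
    rcases Nat.eq_or_lt_of_le hpq with rfl | hlt
    · exact le_refl _
    · exact List.pairwise_iff_getElem.1 hs p q _ hq hlt
  induction fuel generalizing lo hi with
  | zero =>
    have : lo = hi := le_antisymm hlo (by omega)
    subst this
    simp only [PySem.List.bisectRightLoop]
    exact ⟨le_refl _, le_refl _, fun j hj h1 h2 => by omega, fun j hj h1 h2 => by omega⟩
  | succ fuel ih =>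
    by_cases hlh : lo < hi
    · have hmid : (lo + hi) / 2 < xs.length := by omega
      have hget : xs[(lo + hi) / 2]? = some (xs[(lo + hi) / 2]) := List.getElem?_eq_getElem hmid
      by_cases hcmp : x < xs[(lo + hi) / 2]
      · have hrec := ih lo ((lo + hi) / 2) (by omega) (by omega) (by omega)
        have hstep : PySem.List.bisectRightLoop xs x (fuel + 1) lo hi =
            PySem.List.bisectRightLoop xs x fuel lo ((lo + hi) / 2) := by
          simp only [PySem.List.bisectRightLoop, hget, if_pos hlh, if_pos hcmp]
        rw [hstep]
        refine ⟨hrec.1, le_trans hrec.2.1 (by omega), hrec.2.2.1, ?_⟩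
        intro j hj h1 h2
        by_cases hjm : j < (lo + hi) / 2
        · exact hrec.2.2.2 j hj h1 hjm
        · exact lt_of_lt_of_le hcmp (hmono _ j (by omega) hj)
      · have hrec := ih ((lo + hi) / 2 + 1) hi (by omega) hhi (by omega)
        have hstep : PySem.List.bisectRightLoop xs x (fuel + 1) lo hi =
            PySem.List.bisectRightLoop xs x fuel ((lo + hi) / 2 + 1) hi := by
          simp only [PySem.List.bisectRightLoop, hget, if_pos hlh, if_neg hcmp]
        rw [hstep]
        refine ⟨le_trans (by omega) hrec.1, hrec.2.1, ?_, hrec.2.2.2⟩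
        intro j hj h1 h2
        by_cases hjm : (lo + hi) / 2 + 1 ≤ j
        · exact hrec.2.2.1 j hj hjm h2
        · exact le_trans (hmono j ((lo + hi) / 2) (by omega) hmid) (le_of_not_gt hcmp)
    · have : ¬ lo < hi := hlh
      simp only [PySem.List.bisectRightLoop, if_neg this]
      exact ⟨le_refl _, hlo, fun j hj h1 h2 => by omega, fun j hj h1 h2 => by omega⟩

lemma bisectRight_spec_str (xs : List String) (x : String) (hs : xs.Pairwise (· ≤ ·)) :
    PySem.List.bisectRight xs x ≤ xs.length ∧
    (∀ j (hj : j < xs.length), j < PySem.List.bisectRight xs x → xs[j] ≤ x) ∧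
    (∀ j (hj : j < xs.length), PySem.List.bisectRight xs x ≤ j → x < xs[j]) := by
  have h := bisectRightLoop_spec xs x xs.length 0 xs.length hs (Nat.zero_le _) (le_refl _) (by omega)
  exact ⟨h.2.1, fun j hj h2 => h.2.2.1 j hj (Nat.zero_le _) h2, fun j hj h1 => h.2.2.2 j hj h1 hj⟩

-- inserting at any position r with "everything before ≤ n, first element from r on > n"
-- is the linear ordered insert
lemma insertAt_eq_pvInsort (xs : List String) (n : String) (r : Nat)
    (hr : r ≤ xs.length)
    (hbefore : ∀ j (hj : j < xs.length), j < r → xs[j] ≤ n)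
    (hafter : ∀ (hj : r < xs.length), n < xs[r]) :
    xs.take r ++ n :: xs.drop r = pvInsort xs n := by
  induction xs generalizing r with
  | nil => simp at hr; simp [hr, pvInsort]
  | cons x t ih =>
    match r with
    | 0 =>
      have hx : n < x := hafter (by simp)
      simp [pvInsort, hx]
    | s + 1 =>
      have hx : ¬ n < x := not_lt.2 (hbefore 0 (by simp) (by omega))
      simp only [pvInsort, if_neg hx, List.take_succ_cons, List.drop_succ_cons, List.cons_append,
        List.cons.injEq, true_and]
      exact ih s (by simpa using hr)
        (fun j hj hjr => hbefore (j + 1) (by simpa using hj) (by omega))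
        (fun hj => hafter (by simpa using hj))

-- on a sorted list, B's binary-search insert IS the linear ordered insert
lemma pvInsortB_eq_pvInsort (xs : List String) (n : String) (hs : xs.Pairwise (· ≤ ·)) :
    pvInsortB xs n = pvInsort xs n := by
  have h := bisectRight_spec_str xs n hs
  exact insertAt_eq_pvInsort xs n _ h.1
    (fun j hj hjr => h.2.1 j hj hjr)
    (fun hj => h.2.2 _ hj (le_refl _))

lemma insort_perm (lst : List String) (n : String) : (pvInsort lst n).Perm (n :: lst) := by
  induction lst with
  | nil => simp [pvInsort]
  | cons x t ih =>
    simp only [pvInsort]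
    split_ifs with h
    · exact List.Perm.refl _
    · exact (ih.cons x).trans (List.Perm.swap n x t)

lemma insort_pairwise (lst : List String) (n : String)
    (h : lst.Pairwise (· ≤ ·)) : (pvInsort lst n).Pairwise (· ≤ ·) := by
  induction lst with
  | nil => simp [pvInsort]
  | cons x t ih =>
    rw [List.pairwise_cons] at h
    simp only [pvInsort]
    split_ifs with hlt
    · refine List.pairwise_cons.2 ⟨?_, List.pairwise_cons.2 h⟩
      intro y hy
      rcases List.mem_cons.1 hy with rfl | hy'
      · exact le_of_lt hlt
      · exact (le_of_lt hlt).trans (h.1 y hy')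
    · refine List.pairwise_cons.2 ⟨?_, ih h.2⟩
      intro y hy
      rcases List.mem_cons.1 ((insort_perm t n).mem_iff.1 hy) with rfl | hy'
      · exact le_of_not_gt hlt
      · exact h.1 y hy'

-- B's bucket fold from a sorted accumulator computes the linear-insert fold
lemma foldl_pvInsortB_eq (ys : List String) (acc : List String) (h : acc.Pairwise (· ≤ ·)) :
    ys.foldl pvInsortB acc = ys.foldl pvInsort acc := by
  induction ys generalizing acc with
  | nil => rfl
  | cons y t ih =>
    simp only [List.foldl_cons, pvInsortB_eq_pvInsort _ _ h]
    exact ih _ (insort_pairwise _ _ h)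

lemma foldl_insort_perm (ys : List String) (acc : List String) :
    (ys.foldl pvInsort acc).Perm (acc ++ ys) := by
  induction ys generalizing acc with
  | nil => simp
  | cons y t ih =>
    simp only [List.foldl_cons]
    refine (ih _).trans ?_
    exact ((insort_perm acc y).append_right t).trans List.perm_middle.symm

lemma foldl_insort_pairwise (ys : List String) (acc : List String)
    (h : acc.Pairwise (· ≤ ·)) : (ys.foldl pvInsort acc).Pairwise (· ≤ ·) := by
  induction ys generalizing acc with
  | nil => exact h
  | cons y t ih => exact ih _ (insort_pairwise _ _ h)

lemma foldl_insortB_eq_sorted (ys : List String) :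
    ys.foldl pvInsortB [] = PySem.List.sorted ys (fun x => x) false := by
  rw [foldl_pvInsortB_eq ys [] (by simp)]
  symm
  exact PySem.List.sorted_id_eq_of_perm_of_pairwise ys (ys.foldl pvInsort [])
    ((foldl_insort_perm ys []).trans (by simp))
    (foldl_insort_pairwise ys [] (by simp))

-- both bucket folds compute the three filters (A literally, B via sorted insertion)
lemma foldl_pvStepA (xs : List String) (a b c : List String) :
    xs.foldl pvStepA (a, b, c) =
      (a ++ xs.filter (fun n => !pvIsS1 n && !pvIsS2 n),
       b ++ xs.filter pvIsS1,
       c ++ xs.filter pvIsS2) := by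
  induction xs generalizing a b c with
  | nil => simp
  | cons x xs ih =>
    simp only [List.foldl_cons, pvStepA]
    by_cases h1 : pvIsS1 x
    · have h2 : pvIsS2 x = false := by
        simp only [pvIsS1, pvIsS2, beq_iff_eq] at h1 ⊢
        simp [h1]
      simp [h1, h2, ih]
    · by_cases h2 : pvIsS2 x
      · simp [h1, h2, ih]
      · simp [h1, h2, ih]

lemma foldl_pvStepB (xs : List String) (a b c : List String) :
    xs.foldl pvStepB (a, b, c) =
      ((xs.filter (fun n => !pvIsS1 n && !pvIsS2 n)).foldl pvInsortB a,
       (xs.filter pvIsS1).foldl pvInsortB b,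
       (xs.filter pvIsS2).foldl pvInsortB c) := by
  induction xs generalizing a b c with
  | nil => simp
  | cons x xs ih =>
    simp only [List.foldl_cons, pvStepB]
    by_cases h1 : pvIsS1 x
    · have h2 : pvIsS2 x = false := by
        simp only [pvIsS1, pvIsS2, beq_iff_eq] at h1 ⊢
        simp [h1]
      simp [h1, h2, ih]
    · by_cases h2 : pvIsS2 x
      · simp [h1, h2, ih]
      · simp [h1, h2, ih]

-- ===== VERDICT =====
theorem sort_nodes_spec : Claim_equal_sort_nodes := by
  intro nodes_show _
  unfold Spec_sort_nodes sort_nodes sort_nodes_alt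
  simp only [foldl_pvStepA, foldl_pvStepB, List.nil_append, foldl_insortB_eq_sorted]
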